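-- pv_equiv track=rewrite | github.com/D13G04L3X/Librerias-dinamicas | Librerias_Dinamicas/hmm_py.py | segments_from_posterior
-- ===== SOURCE A (Python) =====
-- from typing import List, Tuple
--
-- def segments_from_posterior(posterior: List[int]) -> List[Tuple[int,int]]:
--     """
--     Convierte lista 0/1 a segmentos (start, end) inclusive [start, end]
--     """
--     segs = []
--     n = len(posterior)
--     i = 0
--     while i < n:
--         if posterior[i] == 1:
--             start = i
--             while i+1 < n and posterior[i+1] == 1:
--                 i += 1
--             end = i
--             segs.append((start, end))
--         i += 1
--     return segs
-- ===== SOURCE B (Python) =====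
-- from typing import List, Tuple, Optional
--
-- def segments_from_posterior(posterior: List[int]) -> List[Tuple[int, int]]:
--     """Single-pass edge-detecting state machine: track the start of the
--     current 1-run; close a segment on each 1->non-1 edge, flush at the end."""
--     segs = []
--     start: Optional[int] = None
--     for i, v in enumerate(posterior):
--         if v == 1:
--             if start is None:
--                 start = i
--         else:
--             if start is not None:
--                 segs.append((start, i - 1))
--                 start = None
--     if start is not None:
--         segs.append((start, len(posterior) - 1))
--     return segs
-- ===== Notes on version B (the rewrite author's own statement) =====
-- stated objective: alternative
-- what changed: Replaced the index-jumping outer while with an inner cursor-advancing while by a flat single-pass state machine over enumerate that detects run edges (open a segment on 0->1, close it with end=i-1 on 1->0, flush the trailing run).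
import Mathlib
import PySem

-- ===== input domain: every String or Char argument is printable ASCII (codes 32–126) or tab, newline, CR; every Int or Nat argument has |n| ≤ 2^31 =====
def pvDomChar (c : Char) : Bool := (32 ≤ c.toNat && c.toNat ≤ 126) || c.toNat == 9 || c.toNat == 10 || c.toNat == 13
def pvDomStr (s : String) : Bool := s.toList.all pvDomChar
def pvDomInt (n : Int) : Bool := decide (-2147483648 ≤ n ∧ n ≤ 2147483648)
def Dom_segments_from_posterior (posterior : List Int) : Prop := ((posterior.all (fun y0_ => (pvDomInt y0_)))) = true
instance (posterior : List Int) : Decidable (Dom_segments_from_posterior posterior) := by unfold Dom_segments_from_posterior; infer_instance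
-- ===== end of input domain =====

-- B replaces A's cursor-jumping nested while loops by a flat single-pass edge-detecting
-- state machine over enumerate (objective: alternative decomposition, same O(n) cost).

-- ===== PORT A =====
-- inner 'while i+1 < n and posterior[i+1] == 1: i += 1' — returns the final cursor i.
-- i is a nonnegative in-range Python index throughout, so List.getD is exact here.
def advA (p : List Int) (i : Nat) : Nat :=
  if h : i + 1 < p.length ∧ p.getD (i + 1) 0 = 1 then advA p (i + 1) else i
termination_by p.length - i
decreasing_by omega

theorem advA_ge (p : List Int) (i : Nat) : i ≤ advA p i := by
  rw [advA]
  by_cases h : i + 1 < p.length ∧ p.getD (i + 1) 0 = 1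
  · rw [dif_pos h]
    have := advA_ge p (i + 1)
    omega
  · rw [dif_neg h]
termination_by p.length - i
decreasing_by omega

-- outer 'while i < n' of A, carrying the accumulated segs
def loopA (p : List Int) (i : Nat) (segs : List (Int × Int)) : List (Int × Int) :=
  if h : i < p.length then
    if p.getD i 0 = 1 then
      loopA p (advA p i + 1) (segs ++ [((i : Int), ((advA p i : Nat) : Int))])
    else
      loopA p (i + 1) segs
  else segs
termination_by p.length - i
decreasing_by
  · have := advA_ge p i; omega
  · omega

def segments_from_posterior (posterior : List Int) : List (Int × Int) :=
  loopA posterior 0 []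

-- ===== PORT B =====
-- one step of the state machine: state = (segs so far, optional start of the open run)
def stepB (s : List (Int × Int) × Option Int) (iv : Int × Int) :
    List (Int × Int) × Option Int :=
  match s.2 with
  | none => if iv.2 = 1 then (s.1, some iv.1) else s
  | some st => if iv.2 = 1 then s else (s.1 ++ [(st, iv.1 - 1)], none)

def segments_from_posterior_alt (posterior : List Int) : List (Int × Int) :=
  let r := (PySem.List.enumerate posterior 0).foldl stepB ([], none)
  match r.2 with
  | none => r.1
  | some st => r.1 ++ [(st, (posterior.length : Int) - 1)]

-- ===== PRECONDITION & SPEC =====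
def Spec_segments_from_posterior (posterior : List Int) (out : List (Int × Int)) : Prop := out = segments_from_posterior_alt posterior
instance (posterior : List Int) (out : List (Int × Int)) : Decidable (Spec_segments_from_posterior posterior out) := by unfold Spec_segments_from_posterior; infer_instance

-- ===== CLAIM (what is proved, stated in full; the proofs are below) =====
def Claim_equal_segments_from_posterior : Prop := ∀ (posterior : List Int), Dom_segments_from_posterior posterior → Spec_segments_from_posterior posterior (segments_from_posterior posterior)

-- ===== LEMMAS AND PROOFS =====

theorem advA_stop (p : List Int) (i : Nat)
    (h : ¬ (i + 1 < p.length ∧ p.getD (i + 1) 0 = 1)) : advA p i = i := by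
  rw [advA, dif_neg h]

theorem advA_go (p : List Int) (i : Nat)
    (h : i + 1 < p.length ∧ p.getD (i + 1) 0 = 1) : advA p i = advA p (i + 1) := by
  rw [advA, dif_pos h]

-- targeted unfoldings of A's outer loop
theorem loopA_end (p : List Int) (k : Nat) (segs : List (Int × Int))
    (h : ¬ k < p.length) : loopA p k segs = segs := by
  rw [loopA, dif_neg h]

theorem loopA_one (p : List Int) (k : Nat) (segs : List (Int × Int))
    (hk : k < p.length) (h1 : p.getD k 0 = 1) :
    loopA p k segs = loopA p (advA p k + 1) (segs ++ [((k : Int), ((advA p k : Nat) : Int))]) := by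
  rw [loopA, dif_pos hk, if_pos h1]

theorem loopA_zero (p : List Int) (k : Nat) (segs : List (Int × Int))
    (hk : k < p.length) (h1 : ¬ p.getD k 0 = 1) :
    loopA p k segs = loopA p (k + 1) segs := by
  rw [loopA, dif_pos hk, if_neg h1]

-- B's fold restricted to the suffix of p starting at index k
def foldFrom (p : List Int) (k : Nat) (s : List (Int × Int) × Option Int) :
    List (Int × Int) × Option Int :=
  (PySem.List.enumerate (p.drop k) (k : Int)).foldl stepB s

-- B's post-loop flush
def finish (r : List (Int × Int) × Option Int) (n : Int) : List (Int × Int) :=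
  match r.2 with
  | none => r.1
  | some st => r.1 ++ [(st, n - 1)]

theorem foldFrom_step (p : List Int) (k : Nat) (hk : k < p.length)
    (s : List (Int × Int) × Option Int) :
    foldFrom p k s = foldFrom p (k + 1) (stepB s ((k : Int), p.getD k 0)) := by
  unfold foldFrom
  rw [List.drop_eq_getElem_cons hk, PySem.List.enumerate_cons, List.foldl_cons]
  rw [List.getD_eq_getElem p 0 hk]
  have hcast : ((k : Int) + 1) = (((k + 1 : Nat)) : Int) := by push_cast; ring
  rw [hcast]

theorem foldFrom_end (p : List Int) (k : Nat) (hk : ¬ k < p.length)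
    (s : List (Int × Int) × Option Int) : foldFrom p k s = s := by
  unfold foldFrom
  rw [List.drop_eq_nil_of_le (by omega), PySem.List.enumerate_nil, List.foldl_nil]

theorem stepB_some_one (segs : List (Int × Int)) (st i v : Int) (hv : v = 1) :
    stepB (segs, some st) (i, v) = (segs, some st) := by
  simp only [stepB, if_pos hv]

theorem stepB_some_not1 (segs : List (Int × Int)) (st i v : Int) (hv : ¬ v = 1) :
    stepB (segs, some st) (i, v) = (segs ++ [(st, i - 1)], none) := by
  simp only [stepB, if_neg hv]

theorem stepB_none_one (segs : List (Int × Int)) (i v : Int) (hv : v = 1) :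
    stepB (segs, none) (i, v) = (segs, some i) := by
  simp only [stepB, if_pos hv]

theorem stepB_none_not1 (segs : List (Int × Int)) (i v : Int) (hv : ¬ v = 1) :
    stepB (segs, none) (i, v) = (segs, none) := by
  simp only [stepB, if_neg hv]

theorem cast_succ_sub_one (k : Nat) : (((k + 1 : Nat)) : Int) - 1 = (k : Int) := by
  push_cast; ring

-- while the run continues, the open state absorbs the 1s and emits the run's
-- segment (st, advA p k) on the first non-1 (or the flush at the list's end)
theorem run_lemma (p : List Int) (k : Nat) (hk : k < p.length) (h1 : p.getD k 0 = 1)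
    (segs : List (Int × Int)) (st : Int) :
    finish (foldFrom p k (segs, some st)) (p.length : Int)
      = finish (foldFrom p (advA p k + 1) (segs ++ [(st, ((advA p k : Nat) : Int))], none))
          (p.length : Int) := by
  rw [foldFrom_step p k hk, stepB_some_one _ _ _ _ h1]
  by_cases hc : k + 1 < p.length ∧ p.getD (k + 1) 0 = 1
  · rw [advA_go p k hc]
    exact run_lemma p (k + 1) hc.1 hc.2 segs st
  · rw [advA_stop p k hc]
    by_cases h2 : k + 1 < p.length
    · have hne : ¬ p.getD (k + 1) 0 = 1 := fun he => hc ⟨h2, he⟩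
      rw [foldFrom_step p (k + 1) h2, foldFrom_step p (k + 1) h2,
        stepB_some_not1 _ _ _ _ hne, stepB_none_not1 _ _ _ hne, cast_succ_sub_one]
    · rw [foldFrom_end p (k + 1) h2, foldFrom_end p (k + 1) h2]
      have hl : p.length = k + 1 := by omega
      simp only [finish, hl]
      rw [cast_succ_sub_one]
termination_by p.length - k
decreasing_by omega

theorem main_lemma (p : List Int) (k : Nat) (segs : List (Int × Int)) :
    finish (foldFrom p k (segs, none)) (p.length : Int) = loopA p k segs := by
  by_cases hk : k < p.length
  · rw [foldFrom_step p k hk]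
    by_cases h1 : p.getD k 0 = 1
    · rw [stepB_none_one _ _ _ h1, loopA_one p k segs hk h1]
      by_cases hc : k + 1 < p.length ∧ p.getD (k + 1) 0 = 1
      · rw [run_lemma p (k + 1) hc.1 hc.2 segs (k : Int), advA_go p k hc]
        exact main_lemma p (advA p (k + 1) + 1)
          (segs ++ [((k : Int), ((advA p (k + 1) : Nat) : Int))])
      · rw [advA_stop p k hc]
        by_cases h2 : k + 1 < p.length
        · have hne : ¬ p.getD (k + 1) 0 = 1 := fun he => hc ⟨h2, he⟩
          rw [foldFrom_step p (k + 1) h2, stepB_some_not1 _ _ _ _ hne, cast_succ_sub_one,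
            main_lemma p (k + 2) (segs ++ [((k : Int), (k : Int))]),
            loopA_zero p (k + 1) _ h2 hne]
        · rw [foldFrom_end p (k + 1) h2, loopA_end p (k + 1) _ h2]
          have hl : p.length = k + 1 := by omega
          simp only [finish, hl]
          rw [cast_succ_sub_one]
    · rw [stepB_none_not1 _ _ _ h1, main_lemma p (k + 1) segs, loopA_zero p k segs hk h1]
  · rw [foldFrom_end p k hk, loopA_end p k segs hk]
    simp only [finish]
termination_by p.length - k
decreasing_by
  · have := advA_ge p (k + 1); omega
  · omega
  · omega

-- ===== VERDICT (by name: the statement is the Claim_ definition above) =====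
theorem segments_from_posterior_spec : Claim_equal_segments_from_posterior := by
  intro p _
  unfold Spec_segments_from_posterior segments_from_posterior segments_from_posterior_alt
  have h := main_lemma p 0 []
  unfold foldFrom at h
  simpa [finish] using h.symm
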